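-- pv_equiv track=rewrite | github.com/CodecoolMSC2016/python-lightweight-erp-3rd-tw-godlike-hedgehog-sq4d | hr/hr.py | get_oldest_person
-- ===== SOURCE A (Python) =====
-- def get_oldest_person(table):
--     oldest_person = []
--     birth_date = table[0][2]
--     for item in table:
--         if item[2] < birth_date:
--             birth_date = item[2]
--     for item in table:
--         if item[2] == birth_date:
--             oldest_person.append(item[1])
--
--     return(oldest_person)
-- ===== SOURCE B (Python) =====
-- def get_oldest_person(table):
--     best = None
--     for item in reversed(table):
--         if best is None or item[2] < best[0]:
--             best = (item[2], [item[1]])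
--         elif item[2] == best[0]:
--             best = (best[0], [item[1]] + best[1])
--     return best[1] if best else []
-- ===== Notes on version B (the rewrite author's own statement) =====
-- stated objective: alternative
-- what changed: Replaced A's two forward passes (min-date scan, then name collection) with a single backward traversal that maintains the (current minimum date, its names) pair, building the name list back-to-front by prepending.
import Mathlib
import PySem

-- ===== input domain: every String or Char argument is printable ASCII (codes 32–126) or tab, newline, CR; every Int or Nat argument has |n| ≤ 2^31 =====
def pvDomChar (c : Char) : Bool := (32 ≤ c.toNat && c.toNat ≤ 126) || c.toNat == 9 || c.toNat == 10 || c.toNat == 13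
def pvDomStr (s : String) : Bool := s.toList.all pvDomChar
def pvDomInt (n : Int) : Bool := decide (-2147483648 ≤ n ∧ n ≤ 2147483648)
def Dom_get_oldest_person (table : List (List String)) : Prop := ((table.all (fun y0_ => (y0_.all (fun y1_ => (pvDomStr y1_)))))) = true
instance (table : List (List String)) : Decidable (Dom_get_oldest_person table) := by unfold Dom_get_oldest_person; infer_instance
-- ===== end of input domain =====

-- B replaces A's two forward passes by one backward pass maintaining the
-- (current minimum date, its names) pair, building the name list back-to-front.

-- ===== PORT A =====
-- item[2] / item[1]; Pre_ guarantees indices in range, so .getD never fires inside Pre_.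
def pvD2 (item : List String) : String := (PySem.List.pyGet? item 2).getD ""
def pvN1 (item : List String) : String := (PySem.List.pyGet? item 1).getD ""

def get_oldest_person (table : List (List String)) : List String :=
  let birth_date0 := pvD2 ((PySem.List.pyGet? table 0).getD [])
  let birth_date := table.foldl (fun bd item => if pvD2 item < bd then pvD2 item else bd) birth_date0
  table.foldl (fun acc item => if pvD2 item = birth_date then acc ++ [pvN1 item] else acc) []

-- ===== PORT B =====
-- the loop body: one step of B's backward scan over a `best : Option (date × names)` state
def pvStep (best : Option (String × List String)) (item : List String) :
    Option (String × List String) :=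
  match best with
  | none => some (pvD2 item, [pvN1 item])
  | some (d, ns) =>
    if pvD2 item < d then some (pvD2 item, [pvN1 item])
    else if pvD2 item = d then some (d, pvN1 item :: ns)
    else some (d, ns)

def get_oldest_person_alt (table : List (List String)) : List String :=
  match table.reverse.foldl pvStep none with
  | some (_, ns) => ns
  | none => []

-- ===== PRECONDITION & SPEC =====
-- exactly where Python A returns: nonempty table, every row long enough for item[2] (IndexError otherwise)
def Pre_get_oldest_person (table : List (List String)) : Prop :=
  table ≠ [] ∧ ∀ row ∈ table, 3 ≤ row.length
instance (table : List (List String)) : Decidable (Pre_get_oldest_person table) := by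
  unfold Pre_get_oldest_person; infer_instance

def pvWitness_get_oldest_person : List (List String) :=
  [["1", "Alice", "1990"], ["2", "Bob", "1985"], ["3", "Carol", "1985"]]

def Spec_get_oldest_person (table : List (List String)) (out : List String) : Prop := out = get_oldest_person_alt table
instance (table : List (List String)) (out : List String) : Decidable (Spec_get_oldest_person table out) := by unfold Spec_get_oldest_person; infer_instance

-- ===== CLAIM (what is proved, stated in full; the proofs are below) =====
def Claim_equal_get_oldest_person : Prop := ∀ (table : List (List String)), Dom_get_oldest_person table → Pre_get_oldest_person table → Spec_get_oldest_person table (get_oldest_person table)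

-- ===== LEMMAS AND PROOFS =====

-- the minimum date of a nonempty table (helper for the proofs only)
def pvMin : List (List String) → String
  | [] => ""
  | i :: l => if l.isEmpty then pvD2 i else min (pvD2 i) (pvMin l)

theorem pvMin_le (l : List (List String)) : ∀ i ∈ l, pvMin l ≤ pvD2 i := by
  induction l with
  | nil => intro i h; cases h
  | cons x l ih =>
    intro i hi
    rcases List.mem_cons.mp hi with rfl | hi
    · cases l with
      | nil => simp [pvMin]
      | cons y l' =>
        rw [show pvMin (i :: y :: l') = min (pvD2 i) (pvMin (y :: l')) by simp [pvMin]]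
        exact min_le_left _ _
    · have hl : l ≠ [] := List.ne_nil_of_mem hi
      have : pvMin (x :: l) = min (pvD2 x) (pvMin l) := by
        simp [pvMin, List.isEmpty_iff, hl]
      rw [this]
      exact le_trans (min_le_right _ _) (ih i hi)

-- A's minimum fold computed with `min`
theorem pv_step_min (bd d : String) : (if d < bd then d else bd) = min bd d := by
  rcases lt_or_ge d bd with h | h
  · simp [h, min_def, not_le.mpr h]
  · simp [not_lt.mpr h, min_eq_left h]

theorem pv_foldl_min (l : List (List String)) (b : String) :
    l.foldl (fun bd item => if pvD2 item < bd then pvD2 item else bd) b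
      = if l.isEmpty then b else min b (pvMin l) := by
  simp only [pv_step_min]
  induction l generalizing b with
  | nil => simp
  | cons y l' ih =>
    simp only [List.foldl_cons]
    rw [ih]
    cases l' with
    | nil => simp [pvMin]
    | cons z l'' =>
      rw [show pvMin (y :: z :: l'') = min (pvD2 y) (pvMin (z :: l'')) by simp [pvMin]]
      simp [min_assoc]

-- A's collecting fold is filter-then-map
theorem pv_collect (m : String) (l : List (List String)) (a : List String) :
    l.foldl (fun acc item => if pvD2 item = m then acc ++ [pvN1 item] else acc) a
      = a ++ (l.filter (fun i => pvD2 i = m)).map pvN1 := by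
  induction l generalizing a with
  | nil => simp
  | cons x l ih =>
    simp only [List.foldl_cons]
    by_cases h : pvD2 x = m
    · rw [if_pos h, ih, List.filter_cons_of_pos (by simp [h])]
      simp
    · rw [if_neg h, ih, List.filter_cons_of_neg (by simp [h])]

-- B's backward fold, characterised: minimum date together with the filtered names
theorem pv_foldr_char (l : List (List String)) (x : List String) :
    (x :: l).foldr (fun i b => pvStep b i) none
      = some (pvMin (x :: l),
              ((x :: l).filter (fun i => pvD2 i = pvMin (x :: l))).map pvN1) := by
  induction l generalizing x with
  | nil => simp [pvStep, pvMin]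
  | cons y l' ih =>
    have hmin : pvMin (x :: y :: l') = min (pvD2 x) (pvMin (y :: l')) := by simp [pvMin]
    have hstep : (x :: y :: l').foldr (fun i b => pvStep b i) none
        = pvStep ((y :: l').foldr (fun i b => pvStep b i) none) x := rfl
    rw [hstep, ih y]
    set m := pvMin (y :: l') with hm
    by_cases h1 : pvD2 x < m
    · have hmin' : pvMin (x :: y :: l') = pvD2 x := by
        rw [hmin, min_eq_left (le_of_lt h1)]
      rw [hmin']
      simp only [pvStep, if_pos h1]
      conv_rhs => rw [List.filter_cons_of_pos (by simp)]
      have hfilt : (y :: l').filter (fun i => decide (pvD2 i = pvD2 x)) = [] := by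
        apply List.filter_eq_nil_iff.mpr
        intro i hi
        simp only [decide_eq_true_eq]
        intro he
        exact absurd (he ▸ pvMin_le (y :: l') i hi) (not_le.mpr h1)
      rw [hfilt]
      rfl
    · by_cases h2 : pvD2 x = m
      · have hmin' : pvMin (x :: y :: l') = m := by rw [hmin, h2, min_self]
        rw [hmin']
        simp only [pvStep, if_neg h1, if_pos h2]
        conv_rhs => rw [List.filter_cons_of_pos (by simp [h2])]
        rfl
      · have h3 : m < pvD2 x := by
          rcases lt_trichotomy (pvD2 x) m with h | h | h
          · exact absurd h h1
          · exact absurd h h2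
          · exact h
        have hmin' : pvMin (x :: y :: l') = m := by rw [hmin, min_eq_right (le_of_lt h3)]
        rw [hmin']
        simp only [pvStep, if_neg h1, if_neg h2]
        conv_rhs => rw [List.filter_cons_of_neg (by simp [h2])]

-- ===== VERDICT (by name: the statement is the Claim_ definition above) =====
theorem get_oldest_person_spec : Claim_equal_get_oldest_person := by
  intro table _ hpre
  show get_oldest_person table = get_oldest_person_alt table
  obtain ⟨hne, -⟩ := hpre
  cases table with
  | nil => exact absurd rfl hne
  | cons x l =>
    simp only [get_oldest_person, get_oldest_person_alt, List.foldl_reverse, pv_foldr_char]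
    have h0 : (PySem.List.pyGet? (x :: l) 0).getD [] = x := by
      simp [PySem.List.pyGet?, PySem.List.pyIdx?]
    rw [h0, pv_collect]
    have hmin : (x :: l).foldl (fun bd item => if pvD2 item < bd then pvD2 item else bd) (pvD2 x)
        = pvMin (x :: l) := by
      rw [pv_foldl_min]
      cases l with
      | nil => simp [pvMin]
      | cons y l' =>
        have : pvMin (x :: y :: l') = min (pvD2 x) (pvMin (y :: l')) := by simp [pvMin]
        simp [this]
    rw [hmin]
    rfl
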